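-- pv_equiv track=rewrite | github.com/slosimon/FizRac | 1-pisni-izpit-201415/03-naloga-3-zabe.py | pojedina
-- ===== SOURCE A (Python) =====
-- import queue
--
-- def pojedina(m):
-- 	l = [0] * len(m)
-- 	o = queue.PriorityQueue()
-- 	l[0] = m[0]
-- 	o.put(0, 0)
-- 	maximum = 0
-- 	while not o.empty():
-- 		a = o.get()
-- 		if a+2 < len(m):
-- 			if l[a+2] < l[a] + m[a+2]:
-- 				l[a+2] = l[a]+m[a+2]
-- 				o.put(a+2, a+2)
-- 		if a+3 < len(m):
-- 			if l[a+3] < l[a] + m[a+3]: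
-- 				l[a+3] = l[a]+m[a+3]
-- 				o.put(a+3, a+3)
-- 	return max(l)
-- ===== SOURCE B (Python) =====
-- def pojedina(m):
--     """Frog on stones 0..n-1, jumping +2 or +3 from the start stone 0; m[i] is
--     gained (or lost, if negative) on stone i.  A route stays worth pursuing
--     only while its running total is positive: `alive` maps the start stone and
--     every stone reached with a positive total to the best such total.  Each
--     stone scores the best total achieved on it (0 if none); the answer is the
--     best stone score."""
--     n = len(m)
--     score = [0] * n
--     score[0] = m[0]
--     alive = {0: m[0]}
--     for i in range(2, n):
--         prev = [alive[j] for j in (i - 2, i - 3) if j in alive]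
--         if prev and max(prev) + m[i] > 0:
--             alive[i] = max(prev) + m[i]
--             score[i] = alive[i]
--     return max(score)
-- ===== Notes on version B (the rewrite author's own statement) =====
-- stated objective: alternative
-- what changed: Replaces A's priority-queue relaxation loop (repeated pops and ordered re-insertions) by a single forward pass that keeps a dict of still-pursuable routes (stone -> best positive running total) and a per-stone score array; Pre_ excludes only the empty list, on which A raises IndexError.
import Mathlib
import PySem

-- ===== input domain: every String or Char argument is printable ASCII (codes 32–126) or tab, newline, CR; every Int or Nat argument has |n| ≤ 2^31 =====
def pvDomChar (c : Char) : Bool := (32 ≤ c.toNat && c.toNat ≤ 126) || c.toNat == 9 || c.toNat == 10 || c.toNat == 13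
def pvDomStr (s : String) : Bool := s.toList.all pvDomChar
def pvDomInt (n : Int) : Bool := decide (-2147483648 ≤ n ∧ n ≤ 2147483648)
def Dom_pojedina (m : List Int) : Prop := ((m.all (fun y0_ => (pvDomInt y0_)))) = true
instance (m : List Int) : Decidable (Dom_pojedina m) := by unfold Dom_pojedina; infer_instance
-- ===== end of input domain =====

-- B replaces A's priority-queue relaxation loop (pops with repeated ordered re-insertions) by a
-- single forward pass keeping a dict of still-pursuable routes plus a per-stone score array.

-- ===== PORT A =====
-- The PriorityQueue is modelled as an ascending sorted list of indices (get = head = min,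
-- put = ordered insert).  Queue indices are nonnegative by construction, so they are ℕ.
-- The while-loop runs on fuel 2*len(m)+2, which is proved sufficient (each index is
-- inserted at most twice, once per predecessor improving it, plus the initial 0).
def pojedinaLoop (m : List Int) : ℕ → List Int → List ℕ → Int
  | 0, l, _ => (match PySem.List.max? l (fun x => x) with | some v => v | none => 0)
  | fuel+1, l, q =>
    match q with
    | [] => (match PySem.List.max? l (fun x => x) with | some v => v | none => 0)
    | a :: rest =>
      let s1 : List Int × List ℕ :=
        if a+2 < m.length ∧ l.getD (a+2) 0 < l.getD a 0 + m.getD (a+2) 0 then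
          (l.set (a+2) (l.getD a 0 + m.getD (a+2) 0), rest.orderedInsert (· ≤ ·) (a+2))
        else (l, rest)
      let s2 : List Int × List ℕ :=
        if a+3 < m.length ∧ s1.1.getD (a+3) 0 < s1.1.getD a 0 + m.getD (a+3) 0 then
          (s1.1.set (a+3) (s1.1.getD a 0 + m.getD (a+3) 0), s1.2.orderedInsert (· ≤ ·) (a+3))
        else s1
      pojedinaLoop m fuel s2.1 s2.2

def pojedina (m : List Int) : Int :=
  pojedinaLoop m (2*m.length+2) ((List.replicate m.length (0:Int)).set 0 (m.getD 0 0)) [0]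

-- ===== PORT B =====
-- literal transliteration of Source B; the loop indices i of range(2,n) are nonnegative ints,
-- so .toNat is exact on them; `j in alive` / `alive[j]` are Dict.contains / getD.
def pojedina_alt (m : List Int) : Int :=
  let score := (List.replicate m.length (0:Int)).set 0 (m.getD 0 0)
  let alive : PySem.Dict Int Int := PySem.Dict.ofList [((0:Int), m.getD 0 0)]
  let r := (PySem.List.pyRange 2 (m.length : Int) 1).foldl
    (fun (s : List Int × PySem.Dict Int Int) (i : Int) =>
      let prev := ([i-2, i-3].filter (fun j => s.2.contains j)).map (fun j => s.2.getD j 0)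
      match PySem.List.max? prev (fun x => x) with
      | none => s
      | some mx =>
        if 0 < mx + m.getD i.toNat 0 then
          (s.1.set i.toNat (mx + m.getD i.toNat 0), s.2.insert i (mx + m.getD i.toNat 0))
        else s)
    (score, alive)
  match PySem.List.max? r.1 (fun x => x) with | some v => v | none => 0

-- ===== PRECONDITION & SPEC =====
-- A reads the first element of m; on the empty list it raises IndexError, so Pre_ excludes the empty list.
def Pre_pojedina (m : List Int) : Prop := m ≠ []
instance (m : List Int) : Decidable (Pre_pojedina m) := by unfold Pre_pojedina; infer_instance
def pvWitness_pojedina : List Int := [3, -1, 2, 4]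

def Spec_pojedina (m : List Int) (out : Int) : Prop := out = pojedina_alt m
instance (m : List Int) (out : Int) : Decidable (Spec_pojedina m out) := by unfold Spec_pojedina; infer_instance

-- ===== CLAIM (what is proved, stated in full; the proofs are below) =====
def Claim_equal_pojedina : Prop := ∀ (m : List Int), Dom_pojedina m → Pre_pojedina m → Spec_pojedina m (pojedina m)

-- ===== LEMMAS AND PROOFS =====

-- The common specification: dp value / liveness per index, by strong recursion.
-- pvDpf m i = (best route total as A's l finally holds it, was-ever-enqueued flag).
def pvRelax (m : List Int) (i : ℕ) : Option Int → Int × Bool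
  | none => (0, false)
  | some x => if 0 < x + m.getD i 0 then (x + m.getD i 0, true) else (0, false)

def pvOpt (p : Int × Bool) : Option Int := if p.2 then some p.1 else none

def pvCmax : Option Int → Option Int → Option Int
  | none, b => b
  | some a, none => some a
  | some a, some b => some (max a b)

def pvDpf (m : List Int) : ℕ → Int × Bool
  | 0 => (m.getD 0 0, true)
  | 1 => (0, false)
  | 2 => pvRelax m 2 (pvOpt (pvDpf m 0))
  | (i+3) => pvRelax m (i+3) (pvCmax (pvOpt (pvDpf m (i+1))) (pvOpt (pvDpf m i)))

def pvDp (m : List Int) (i : ℕ) : Int := (pvDpf m i).1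
def pvReach (m : List Int) (i : ℕ) : Bool := (pvDpf m i).2

-- contribution of predecessor t-1 alone onto index t+2 (A's partially-relaxed entry)
def pvPopt (m : List Int) : ℕ → Option Int
  | 0 => none
  | (t+1) => pvOpt (pvDpf m t)

def pvPval (m : List Int) (t : ℕ) : Int := (pvRelax m (t+2) (pvPopt m t)).1

def pvLfun (m : List Int) (t i : ℕ) : Int :=
  if i ≤ t+1 then pvDp m i else if i = t+2 then pvPval m t else 0
def pvLarr (m : List Int) (t : ℕ) : List Int := (List.range m.length).map (pvLfun m t)

def pvDparr (m : List Int) : List Int := (List.range m.length).map (pvDp m)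

def pvWant (m : List Int) (t i : ℕ) : Prop :=
  i < m.length ∧ t ≤ i ∧ ((i ≤ t+1 ∧ pvReach m i = true) ∨ (i = t+2 ∧ 0 < pvPval m t))

def pvInv (m : List Int) (t : ℕ) (l : List Int) (q : List ℕ) : Prop :=
  t ≤ m.length ∧
  l = pvLarr m t ∧
  q.Pairwise (· ≤ ·) ∧
  (∀ e ∈ q, t ≤ e + 1 ∧ e < m.length ∧ pvReach m e = true) ∧
  (∀ e ∈ q, t ≤ e → pvWant m t e) ∧
  (∀ i, pvWant m t i → i ∈ q)

def pvMaxOf (l : List Int) : Int :=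
  match PySem.List.max? l (fun x => x) with | some v => v | none => 0

-- basic facts
theorem pvRelax_fst_nonneg (m : List Int) (i : ℕ) (c : Option Int) : 0 ≤ (pvRelax m i c).1 := by
  cases c with
  | none => simp [pvRelax]
  | some x => simp only [pvRelax]; split <;> omega

theorem pvRelax_snd_iff (m : List Int) (i : ℕ) (c : Option Int) :
    (pvRelax m i c).2 = true ↔ 0 < (pvRelax m i c).1 := by
  cases c with
  | none => simp [pvRelax]
  | some x => simp only [pvRelax]; split <;> rename_i h <;> rw [List.getD_eq_getElem?_getD] at h <;> simp [h]

theorem pvRelax_ge (m : List Int) (i : ℕ) (x : Int) :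
    x + m.getD i 0 ≤ (pvRelax m i (some x)).1 := by
  simp only [pvRelax]; split <;> omega

theorem pvRelax_mono (m : List Int) (i : ℕ) {x y : Int} (h : x ≤ y) :
    (pvRelax m i (some x)).1 ≤ (pvRelax m i (some y)).1 := by
  simp only [pvRelax]; split <;> split <;> omega

theorem pvCmax_none_right (c : Option Int) : pvCmax c none = c := by cases c <;> rfl

theorem pvRelax_cmax_some (m : List Int) (i : ℕ) (x : Int) (c : Option Int) :
    (pvRelax m i (pvCmax (some x) c)).1
      = max (pvRelax m i (some x)).1 (pvRelax m i c).1 := by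
  cases c with
  | none =>
    have h := pvRelax_fst_nonneg m i (some x)
    have h0 : (pvRelax m i none).1 = (0:Int) := rfl
    rw [pvCmax_none_right, h0, max_eq_left h]
  | some y =>
    rcases le_total x y with h | h
    · have hm : max x y = y := max_eq_right h
      have : pvCmax (some x) (some y) = some y := by simp [pvCmax, hm]
      rw [this, max_eq_right (pvRelax_mono m i h)]
    · have hm : max x y = x := max_eq_left h
      have : pvCmax (some x) (some y) = some x := by simp [pvCmax, hm]
      rw [this, max_eq_left (pvRelax_mono m i h)]

theorem pvRelax_cmax_ge_right (m : List Int) (i : ℕ) (c d : Option Int) :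
    (pvRelax m i d).1 ≤ (pvRelax m i (pvCmax c d)).1 := by
  cases c with
  | none => simp [pvCmax]
  | some x => rw [pvRelax_cmax_some]; exact le_max_right _ _

theorem pvDpf_succ2 (m : List Int) (t : ℕ) :
    pvDpf m (t+2) = pvRelax m (t+2) (pvCmax (pvOpt (pvDpf m t)) (pvPopt m t)) := by
  cases t with
  | zero =>
    have h0 : pvPopt m 0 = none := rfl
    rw [h0, pvCmax_none_right]
    conv_lhs => rw [pvDpf]
  | succ t =>
    show pvDpf m (t+3) = _
    rw [pvDpf]
    rfl

theorem pvReach_zero (m : List Int) : pvReach m 0 = true := rfl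
theorem pvReach_one (m : List Int) : pvReach m 1 = false := rfl

-- any index ≥ 1 that is unreached has dp value 0
theorem pvDp_unreached (m : List Int) (i : ℕ) (h1 : 1 ≤ i) (h2 : pvReach m i = false) :
    pvDp m i = 0 := by
  match i, h1 with
  | 1, _ => rfl
  | (t+2), _ =>
    unfold pvDp
    unfold pvReach at h2
    rw [pvDpf_succ2] at h2 ⊢
    have hs := pvRelax_snd_iff m (t+2) (pvCmax (pvOpt (pvDpf m t)) (pvPopt m t))
    have hnn := pvRelax_fst_nonneg m (t+2) (pvCmax (pvOpt (pvDpf m t)) (pvPopt m t))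
    have hnp : ¬ (0 < (pvRelax m (t+2) (pvCmax (pvOpt (pvDpf m t)) (pvPopt m t))).1) := by
      intro hp
      exact Bool.noConfusion ((hs.mpr hp).symm.trans h2)
    omega

theorem pvDp_pos_of_reach (m : List Int) (t : ℕ) (h : pvReach m (t+2) = true) :
    0 < pvDp m (t+2) := by
  unfold pvReach at h
  rw [pvDpf_succ2] at h
  unfold pvDp
  rw [pvDpf_succ2]
  exact (pvRelax_snd_iff m (t+2) _).mp h


-- set on a range-map is a range-map of the pointwise update
theorem pvSet_map_range {α : Type} (n i : ℕ) (f : ℕ → α) (v : α) :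
    ((List.range n).map f).set i v = (List.range n).map (fun j => if j = i then v else f j) := by
  apply List.ext_getElem
  · simp
  · intro k h1 h2
    rw [List.getElem_set]
    by_cases h : i = k
    · subst h; simp
    · simp [h, Ne.symm h]

theorem pvGetD_map_range {α : Type} (n i : ℕ) (f : ℕ → α) (d : α) :
    ((List.range n).map f).getD i d = if i < n then f i else d := by
  by_cases h : i < n
  · rw [PySem.List.getD_map_range f n i d h]; simp [h]
  · rw [List.getD_eq_getElem?_getD]
    have : ((List.range n).map f).length ≤ i := by simpa using Nat.le_of_not_lt h
    rw [List.getElem?_eq_none this]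
    simp [h]

theorem pvMapRange_congr {α : Type} (n : ℕ) (f g : ℕ → α) (h : ∀ i, i < n → f i = g i) :
    (List.range n).map f = (List.range n).map g := by
  apply List.ext_getElem
  · simp
  · intro k h1 h2
    simpa using h k (by simpa using h1)

-- ===== the B side: the fold computes the dp array and the dict of live routes =====
def pvBarr (m : List Int) (k : ℕ) : List Int :=
  (List.range m.length).map (fun i => if i < k then pvDp m i else 0)

def pvFiltP (m : List Int) (i : ℕ) : Bool := decide (2 ≤ i) && pvReach m i
def pvAliveTail (m : List Int) (k : ℕ) : List (Int × Int) :=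
  ((List.range k).filter (pvFiltP m)).map (fun i => (((i:ℕ):Int), pvDp m i))
def pvAlive (m : List Int) (k : ℕ) : PySem.Dict Int Int :=
  PySem.Dict.mk (((0:Int), m.getD 0 0) :: pvAliveTail m k)

def pvStepB (m : List Int) (s : List Int × PySem.Dict Int Int) (i : Int) :
    List Int × PySem.Dict Int Int :=
  let prev := ([i-2, i-3].filter (fun j => s.2.contains j)).map (fun j => s.2.getD j 0)
  match PySem.List.max? prev (fun x => x) with
  | none => s
  | some mx =>
    if 0 < mx + m.getD i.toNat 0 then
      (s.1.set i.toNat (mx + m.getD i.toNat 0), s.2.insert i (mx + m.getD i.toNat 0))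
    else s

theorem pvAlive_mem_keys (m : List Int) (k : ℕ) (x : Int) :
    x ∈ (pvAlive m k).keys ↔
      x = 0 ∨ ∃ c : ℕ, x = (c:Int) ∧ 2 ≤ c ∧ c < k ∧ pvReach m c = true := by
  simp only [pvAlive, PySem.Dict.keys, pvAliveTail, List.map_cons, List.map_map,
    List.mem_cons, List.mem_map, List.mem_filter, List.mem_range, pvFiltP]
  constructor
  · rintro (h | ⟨c, ⟨hck, hp⟩, hx⟩)
    · exact Or.inl h
    · simp only [Bool.and_eq_true, decide_eq_true_eq] at hp
      exact Or.inr ⟨c, hx.symm, hp.1, hck, hp.2⟩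
  · rintro (h | ⟨c, hx, h2, hck, hr⟩)
    · exact Or.inl h
    · exact Or.inr ⟨c, ⟨hck, by simp [h2, hr]⟩, hx.symm⟩

theorem pvAlive_nodup (m : List Int) (k : ℕ) : (pvAlive m k).keys.Nodup := by
  simp only [pvAlive, PySem.Dict.keys, pvAliveTail, List.map_cons, List.map_map]
  refine List.nodup_cons.mpr ⟨?_, ?_⟩
  · intro h
    obtain ⟨c, hc, he⟩ := List.mem_map.mp h
    have := (List.mem_filter.mp hc).2
    simp only [pvFiltP, Bool.and_eq_true, decide_eq_true_eq] at this
    have : ((c:ℕ):Int) = 0 := he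
    omega
  · refine List.Nodup.map ?_ ((List.nodup_range).filter _)
    intro a b hab
    simpa using hab

theorem pvAlive_get?_nat (m : List Int) (k c : ℕ) (hck : c < k) :
    (pvAlive m k).get? ((c:ℕ):Int) =
      if pvReach m c = true then some (pvDp m c) else none := by
  by_cases hr : pvReach m c = true
  · rw [if_pos hr]
    rcases Nat.eq_zero_or_pos c with rfl | hc1
    · show (PySem.Dict.mk (((0:Int), m.getD 0 0) :: pvAliveTail m k)).get? 0 = _
      rw [PySem.Dict.get?_mk_cons]
      simp
      rfl
    · have h2 : 2 ≤ c := by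
        rcases Nat.lt_or_ge c 2 with h | h
        · interval_cases c
          · exact absurd hr (by rw [pvReach_one]; simp)
        · exact h
      have hmem : ((((c:ℕ):Int)), pvDp m c) ∈ (pvAlive m k).items := by
        show _ ∈ ((0:Int), m.getD 0 0) :: pvAliveTail m k
        refine List.mem_cons_of_mem _ ?_
        exact List.mem_map.mpr ⟨c, List.mem_filter.mpr ⟨List.mem_range.mpr hck, by simp [pvFiltP, h2, hr]⟩, rfl⟩
      exact PySem.Dict.get?_of_mem_items _ hmem (pvAlive_nodup m k)
  · rw [if_neg hr]
    refine (PySem.Dict.get?_eq_none_iff_not_mem_keys _ _).mpr ?_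
    intro hmem
    rcases (pvAlive_mem_keys m k _).mp hmem with h0 | ⟨c', he, _, _, hr'⟩
    · have : c = 0 := by exact_mod_cast h0
      subst this
      exact hr (pvReach_zero m)
    · have : c = c' := by exact_mod_cast he
      subst this
      exact hr hr'

theorem pvAlive_get?_out (m : List Int) (k : ℕ) (x : Int)
    (hx : x ≠ 0 ∧ ∀ c : ℕ, x = (c:Int) → k ≤ c) : (pvAlive m k).get? x = none := by
  refine (PySem.Dict.get?_eq_none_iff_not_mem_keys _ _).mpr ?_
  intro hmem
  rcases (pvAlive_mem_keys m k _).mp hmem with h0 | ⟨c, he, _, hck, _⟩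
  · exact hx.1 h0
  · exact absurd (hx.2 c he) (by omega)

theorem pvAlive_contains_nat (m : List Int) (k c : ℕ) (hck : c < k) :
    (pvAlive m k).contains ((c:ℕ):Int) = pvReach m c := by
  rw [PySem.Dict.contains_eq_isSome_get?, pvAlive_get?_nat m k c hck]
  cases pvReach m c <;> simp

theorem pvAlive_getD_nat (m : List Int) (k c : ℕ) (hck : c < k) (hr : pvReach m c = true) :
    (pvAlive m k).getD ((c:ℕ):Int) 0 = pvDp m c := by
  rw [PySem.Dict.getD_eq_get?_getD, pvAlive_get?_nat m k c hck, if_pos hr]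
  rfl

theorem pvAlive_insert_step (m : List Int) (k : ℕ) (h2 : 2 ≤ k) (hr : pvReach m k = true) :
    (pvAlive m k).insert ((k:ℕ):Int) (pvDp m k) = pvAlive m (k+1) := by
  apply PySem.Dict.ext
  have hcon : (pvAlive m k).contains ((k:ℕ):Int) = false := by
    rw [PySem.Dict.contains_eq_isSome_get?,
      pvAlive_get?_out m k _ ⟨by exact_mod_cast (by omega : (k:ℕ) ≠ 0), fun c he => by
        have : k = c := by exact_mod_cast he
        omega⟩]
    rfl
  rw [PySem.Dict.items_insert_of_not_contains _ _ hcon]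
  show (((0:Int), m.getD 0 0) :: pvAliveTail m k) ++ [(((k:ℕ):Int), pvDp m k)]
      = ((0:Int), m.getD 0 0) :: pvAliveTail m (k+1)
  have : pvAliveTail m (k+1) = pvAliveTail m k ++ [(((k:ℕ):Int), pvDp m k)] := by
    unfold pvAliveTail
    rw [List.range_succ, List.filter_append, List.map_append]
    simp [pvFiltP, h2, hr]
  rw [this]
  simp

theorem pvAlive_stay (m : List Int) (k : ℕ) (hr : pvReach m k = false) :
    pvAlive m (k+1) = pvAlive m k := by
  unfold pvAlive pvAliveTail
  rw [List.range_succ, List.filter_append]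
  simp [pvFiltP, hr]

def pvBranch (m : List Int) (k : ℕ) (c : Option Int) : List Int × PySem.Dict Int Int :=
  match c with
  | none => (pvBarr m k, pvAlive m k)
  | some mx =>
      if 0 < mx + m.getD k 0 then
        ((pvBarr m k).set k (mx + m.getD k 0), (pvAlive m k).insert ((k:ℕ):Int) (mx + m.getD k 0))
      else (pvBarr m k, pvAlive m k)

theorem pvStep_finish (m : List Int) (k : ℕ) (hk2 : 2 ≤ k) (hkn : k < m.length) (c : Option Int)
    (hc : c = pvCmax (pvOpt (pvDpf m (k-2))) (pvPopt m (k-2))) :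
    pvBranch m k c = (pvBarr m (k+1), pvAlive m (k+1)) := by
  unfold pvBranch
  have hdk : pvDpf m k = pvRelax m k c := by
    rw [hc]
    have : k - 2 + 2 = k := by omega
    conv_lhs => rw [← this]
    rw [pvDpf_succ2]
    rw [this]
  have hBsame : (0 < pvDp m k → False) → pvBarr m (k+1) = pvBarr m k := by
    intro h0
    refine pvMapRange_congr _ _ _ (fun i hi => ?_)
    by_cases hik : i < k
    · simp [hik, (by omega : i < k+1)]
    · have hik1 : ¬ i < k + 1 ∨ i = k := by omega
      rcases hik1 with h | h
      · simp [hik, h]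
      · subst h
        have hr : pvReach m i = false := by
          cases hrr : pvReach m i
          · rfl
          · exact absurd (pvDp_pos_of_reach m (i-2) (by rwa [show i-2+2 = i by omega])) (by intro hp; exact h0 (by rwa [show i-2+2 = i by omega] at hp))
        have := pvDp_unreached m i (by omega) hr
        simp [hik, this]
  cases c with
  | none =>
    have h0 : pvDp m k = 0 := by unfold pvDp; rw [hdk]; rfl
    have hrf : pvReach m k = false := by unfold pvReach; rw [hdk]; rfl
    have hf : (0 < pvDp m k → False) := by omega
    simp only []
    rw [hBsame hf, pvAlive_stay m k hrf]
  | some mx =>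
    simp only []
    by_cases hv : 0 < mx + m.getD k 0
    · have hdp : pvDpf m k = (mx + m.getD k 0, true) := by rw [hdk]; simp only [pvRelax]; rw [if_pos hv]
      simp only [if_pos hv]
      rw [Prod.mk.injEq]
      constructor
      · unfold pvBarr
        rw [pvSet_map_range]
        refine pvMapRange_congr _ _ _ (fun i hi => ?_)
        by_cases hik : i = k
        · subst hik; simp [pvDp, hdp]
        · have : (i < k) ↔ (i < k+1) := by omega
          simp [hik, this]
      · have hdpv : pvDp m k = mx + m.getD k 0 := by unfold pvDp; rw [hdp]
        have hrt : pvReach m k = true := by unfold pvReach; rw [hdp]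
        rw [← hdpv, pvAlive_insert_step m k hk2 hrt]
    · have hdp : pvDpf m k = (0, false) := by rw [hdk]; simp only [pvRelax]; rw [if_neg hv]
      have hf : (0 < pvDp m k → False) := by unfold pvDp; rw [hdp]; omega
      have hrf : pvReach m k = false := by unfold pvReach; rw [hdp]
      simp only [if_neg hv]
      rw [hBsame hf, pvAlive_stay m k hrf]

theorem pvStepB_eq (m : List Int) (k : ℕ) (hk2 : 2 ≤ k) (hkn : k < m.length) :
    pvStepB m (pvBarr m k, pvAlive m k) ((k : ℕ) : Int) = (pvBarr m (k+1), pvAlive m (k+1)) := by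
  have hc2 : ((k:Int)-2) = (((k-2:ℕ)):Int) := by omega
  have hcon2 : (pvAlive m k).contains ((k:Int)-2) = pvReach m (k-2) := by
    rw [hc2, pvAlive_contains_nat m k (k-2) (by omega)]
  have hgd2 : pvReach m (k-2) = true → (pvAlive m k).getD ((k:Int)-2) 0 = pvDp m (k-2) := by
    intro h
    rw [hc2, pvAlive_getD_nat m k (k-2) (by omega) h]
  rcases Nat.lt_or_ge k 3 with hk3 | hk3
  · -- k = 2 : the second candidate key is -1 and is not in the dict
    have hk : k = 2 := by omega
    subst hk
    have hr0 : pvReach m 0 = true := rfl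
    have hcB : (pvAlive m 2).contains (-1 : Int) = false := by
      rw [PySem.Dict.contains_eq_isSome_get?,
        pvAlive_get?_out m 2 _ ⟨by norm_num, fun c he => by omega⟩]
      rfl
    have hcA : (pvAlive m 2).contains (0 : Int) = true := by
      have := pvAlive_contains_nat m 2 0 (by omega)
      simpa using this
    have hgA : (pvAlive m 2).getD (0 : Int) 0 = pvDp m 0 := by
      have := pvAlive_getD_nat m 2 0 (by omega) hr0
      simpa using this
    unfold pvStepB
    norm_num [List.filter_cons, List.filter_nil, hcA, hcB, hgA]
    rw [show (PySem.List.max? [pvDp m 0] fun x => x) = some (pvDp m 0) by simpa using PySem.List.max?_id_cons (pvDp m 0) []]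
    show pvBranch m 2 (some (pvDp m 0)) = (pvBarr m 3, pvAlive m 3)
    exact pvStep_finish m 2 (le_refl 2) hkn _ rfl
  · -- k ≥ 3 : both candidate keys are nonnegative
    have hc3 : ((k:Int)-3) = (((k-3:ℕ)):Int) := by omega
    have hcon3 : (pvAlive m k).contains ((k:Int)-3) = pvReach m (k-3) := by
      rw [hc3, pvAlive_contains_nat m k (k-3) (by omega)]
    have hgd3 : pvReach m (k-3) = true → (pvAlive m k).getD ((k:Int)-3) 0 = pvDp m (k-3) := by
      intro h
      rw [hc3, pvAlive_getD_nat m k (k-3) (by omega) h]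
    have hk32 : k - 3 + 1 = k - 2 := by omega
    have hpopt : pvPopt m (k-2) = pvOpt (pvDpf m (k-3)) := by
      rw [← hk32]; rfl
    unfold pvStepB
    simp only [List.filter_cons, List.filter_nil, hcon2, hcon3]
    cases hr2 : pvReach m (k-2) <;> cases hr3 : pvReach m (k-3) <;>
      simp only [Bool.false_eq_true, if_neg, if_pos, List.map_cons, List.map_nil,
        cond_false, cond_true] <;> norm_num
    · show pvBranch m k none = (pvBarr m (k+1), pvAlive m (k+1))
      refine pvStep_finish m k hk2 hkn _ ?_
      simp [pvCmax, hpopt, pvOpt, show (pvDpf m (k-2)).2 = false from hr2, show (pvDpf m (k-3)).2 = false from hr3]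
    · rw [hgd3 hr3]
      rw [show (PySem.List.max? [pvDp m (k-3)] fun x => x) = some (pvDp m (k-3)) from by simpa using PySem.List.max?_id_cons (pvDp m (k-3)) []]
      show pvBranch m k (some (pvDp m (k-3))) = (pvBarr m (k+1), pvAlive m (k+1))
      refine pvStep_finish m k hk2 hkn _ ?_
      simp [pvCmax, hpopt, pvOpt, show (pvDpf m (k-2)).2 = false from hr2, show (pvDpf m (k-3)).2 = true from hr3]
      rfl
    · rw [hgd2 hr2]
      rw [show (PySem.List.max? [pvDp m (k-2)] fun x => x) = some (pvDp m (k-2)) from by simpa using PySem.List.max?_id_cons (pvDp m (k-2)) []]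
      show pvBranch m k (some (pvDp m (k-2))) = (pvBarr m (k+1), pvAlive m (k+1))
      refine pvStep_finish m k hk2 hkn _ ?_
      simp [pvCmax, hpopt, pvOpt, show (pvDpf m (k-2)).2 = true from hr2, show (pvDpf m (k-3)).2 = false from hr3]
      rfl
    · rw [hgd2 hr2, hgd3 hr3]
      rw [show (PySem.List.max? [pvDp m (k-2), pvDp m (k-3)] fun x => x) = some (max (pvDp m (k-2)) (pvDp m (k-3))) from by simpa using PySem.List.max?_id_cons (pvDp m (k-2)) [pvDp m (k-3)]]
      show pvBranch m k (some (max (pvDp m (k-2)) (pvDp m (k-3)))) = (pvBarr m (k+1), pvAlive m (k+1))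
      refine pvStep_finish m k hk2 hkn _ ?_
      simp [pvCmax, hpopt, pvOpt, show (pvDpf m (k-2)).2 = true from hr2, show (pvDpf m (k-3)).2 = true from hr3]
      rfl

theorem pvFoldB (m : List Int) (d : ℕ) : ∀ k, 2 ≤ k → m.length ≤ k + d →
    ((PySem.List.pyRange (k : Int) (m.length : Int) 1).foldl (pvStepB m) (pvBarr m k, pvAlive m k)).1
      = pvBarr m m.length := by
  induction d with
  | zero =>
    intro k h2 hle
    rw [PySem.List.pyRange_one_eq_nil (by exact_mod_cast hle)]
    show pvBarr m k = pvBarr m m.length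
    refine pvMapRange_congr _ _ _ (fun i hi => ?_)
    have hik : i < k := by omega
    simp [hik, hi]
  | succ d ih =>
    intro k h2 hle
    by_cases hkn : k < m.length
    · rw [PySem.List.pyRange_one_cons (by exact_mod_cast hkn)]
      simp only [List.foldl_cons]
      rw [pvStepB_eq m k h2 hkn]
      have : ((k : Int) + 1) = ((k+1 : ℕ) : Int) := by push_cast; ring
      rw [this]
      exact ih (k+1) (by omega) (by omega)
    · rw [PySem.List.pyRange_one_eq_nil (by exact_mod_cast Nat.le_of_not_lt hkn)]
      show pvBarr m k = pvBarr m m.length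
      refine pvMapRange_congr _ _ _ (fun i hi => ?_)
      have hik : i < k := by omega
      simp [hik, hi]

theorem pvDparr_eq_Barr (m : List Int) : pvDparr m = pvBarr m m.length := by
  apply pvMapRange_congr; intro i hi; simp [hi]

theorem pojedina_alt_eq (m : List Int) (hm : m ≠ []) : pojedina_alt m = pvMaxOf (pvDparr m) := by
  have hn : 1 ≤ m.length := by
    cases m with
    | nil => exact absurd rfl hm
    | cons a t => simp
  have hB : (List.replicate m.length (0:Int)).set 0 (m.getD 0 0) = pvBarr m 2 := by
    apply List.ext_getElem
    · simp [pvBarr]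
    · intro k h1 h2
      rw [List.getElem_set]
      unfold pvBarr
      simp only [List.getElem_map, List.getElem_range, List.getElem_replicate]
      match k with
      | 0 => norm_num; rfl
      | 1 => norm_num; rfl
      | (j+2) => norm_num; exact fun h => absurd h (by omega)
  have hA : PySem.Dict.ofList [((0:Int), m.getD 0 0)] = pvAlive m 2 := by
    apply PySem.Dict.ext
    rfl
  have h1 : pojedina_alt m = pvMaxOf (((PySem.List.pyRange ((2:ℕ):Int) (m.length:Int) 1).foldl (pvStepB m) (pvBarr m 2, pvAlive m 2)).1) := by
    rw [← hB, ← hA]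
    rfl
  rw [h1, pvFoldB m m.length 2 (le_refl 2) (by omega)]
  rw [pvDparr_eq_Barr]

-- ===== the A side: the priority-queue loop maintains pvInv =====
theorem pvLarr_getD (m : List Int) (t i : ℕ) :
    (pvLarr m t).getD i 0 = if i < m.length then pvLfun m t i else 0 := by
  unfold pvLarr; rw [pvGetD_map_range]

theorem pvOpt_some (m : List Int) (i : ℕ) (h : pvReach m i = true) :
    pvOpt (pvDpf m i) = some (pvDp m i) := by
  unfold pvOpt pvDp
  unfold pvReach at h
  simp [h]

theorem pvOpt_none (m : List Int) (i : ℕ) (h : pvReach m i = false) :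
    pvOpt (pvDpf m i) = none := by
  unfold pvOpt
  unfold pvReach at h
  simp [h]

theorem pvPopt_succ (m : List Int) (t : ℕ) : pvPopt m (t+1) = pvOpt (pvDpf m t) := rfl

theorem pvPval_nonneg (m : List Int) (t : ℕ) : 0 ≤ pvPval m t := pvRelax_fst_nonneg m (t+2) _

theorem pvReach_iff_pos (m : List Int) (t : ℕ) : pvReach m (t+2) = true ↔ 0 < pvDp m (t+2) := by
  unfold pvReach pvDp
  rw [pvDpf_succ2]
  exact pvRelax_snd_iff m (t+2) _

-- R2: if t is unreached the full dp value at t+2 is just the t-1 contribution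
theorem pvDp_eq_pval (m : List Int) (t : ℕ) (h : pvReach m t = false) :
    pvDp m (t+2) = pvPval m t := by
  unfold pvDp pvPval
  rw [pvDpf_succ2, pvOpt_none m t h]
  rfl

theorem pvDp_both_unreached (m : List Int) (t : ℕ) (h1 : pvReach m (t+1) = false)
    (h0 : pvReach m t = false) : pvDpf m (t+3) = (0, false) := by
  have : pvDpf m (t+3) = pvDpf m ((t+1)+2) := by norm_num
  rw [this, pvDpf_succ2, pvOpt_none m (t+1) h1, pvPopt_succ, pvOpt_none m t h0]
  rfl

-- relaxation bounds: a reached predecessor never improves the final dp value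
theorem pvDp_ge2 (m : List Int) (t : ℕ) (h : pvReach m t = true) :
    pvDp m t + m.getD (t+2) 0 ≤ pvDp m (t+2) := by
  unfold pvDp
  rw [pvDpf_succ2, pvOpt_some m t h]
  rw [pvRelax_cmax_some]
  calc (pvDpf m t).1 + m.getD (t+2) 0 ≤ (pvRelax m (t+2) (some (pvDpf m t).1)).1 := pvRelax_ge m (t+2) _
    _ ≤ _ := le_max_left _ _

theorem pvPval_ge (m : List Int) (t : ℕ) (h : pvReach m t = true) :
    pvDp m t + m.getD (t+3) 0 ≤ pvPval m (t+1) := by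
  unfold pvPval
  rw [pvPopt_succ, pvOpt_some m t h]
  exact pvRelax_ge m (t+3) _

theorem pvDp_ge_pval (m : List Int) (t : ℕ) : pvPval m t ≤ pvDp m (t+2) := by
  unfold pvDp pvPval
  rw [pvDpf_succ2]
  exact pvRelax_cmax_ge_right m (t+2) _ _

-- the priority-queue update step computes the dp value
theorem pvUpd2 (m : List Int) (t : ℕ) (h : pvReach m t = true) :
    pvDp m (t+2) = (if pvPval m t < pvDp m t + m.getD (t+2) 0
                    then pvDp m t + m.getD (t+2) 0 else pvPval m t) := by
  have hnn : 0 ≤ pvPval m t := pvPval_nonneg m t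
  unfold pvDp
  rw [pvDpf_succ2, pvOpt_some m t h, pvRelax_cmax_some]
  have hpv : (pvRelax m (t+2) (pvPopt m t)).1 = pvPval m t := rfl
  rw [hpv]
  have hS : (pvRelax m (t+2) (some (pvDp m t))).1
      = if 0 < pvDp m t + m.getD (t+2) 0 then pvDp m t + m.getD (t+2) 0 else 0 := by
    simp only [pvRelax]
    split <;> rfl
  have hd : (pvDpf m t).1 = pvDp m t := rfl
  rw [hS, hd]
  split <;> rename_i h1
  · rcases lt_or_ge (pvPval m t) (pvDp m t + m.getD (t+2) 0) with h2 | h2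
    · rw [if_pos h2, max_eq_left (le_of_lt h2)]
    · rw [if_neg (not_lt.mpr h2), max_eq_right h2]
  · rw [if_neg (by omega), max_eq_right hnn]

theorem pvPval_succ_eq (m : List Int) (t : ℕ) (h : pvReach m t = true) :
    pvPval m (t+1) = (if 0 < pvDp m t + m.getD (t+3) 0
                      then pvDp m t + m.getD (t+3) 0 else 0) := by
  unfold pvPval
  rw [pvPopt_succ, pvOpt_some m t h]
  have : t + 1 + 2 = t + 3 := by norm_num
  rw [this]
  simp only [pvRelax]
  split <;> rfl

-- once nothing ≥ t is wanted, everything ≥ t is unreached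
theorem pvTail_unreached (m : List Int) (t : ℕ) (h1 : 1 ≤ t)
    (hw : ∀ i, ¬ pvWant m t i) :
    ∀ i, t ≤ i → i < m.length → pvReach m i = false := by
  intro i
  induction i using Nat.strong_induction_on with
  | _ i ih =>
    intro hti hin
    by_cases hle : i ≤ t+1
    · cases hr : pvReach m i
      · rfl
      · exact absurd ⟨hin, hti, Or.inl ⟨hle, hr⟩⟩ (hw i)
    · by_cases hit2 : i = t+2
      · subst hit2
        have hrt : pvReach m t = false := ih t (by omega) (le_refl t) (by omega)
        have hpv : ¬ (0 < pvPval m t) := fun hp => (hw (t+2)) ⟨hin, by omega, Or.inr ⟨rfl, hp⟩⟩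
        cases hr : pvReach m (t+2)
        · rfl
        · have := (pvReach_iff_pos m t).mp hr
          rw [pvDp_eq_pval m t hrt] at this
          omega
      · have hi3 : t+3 ≤ i := by omega
        obtain ⟨j, rfl⟩ : ∃ j, i = j + 3 := ⟨i - 3, by omega⟩
        have hj1 : pvReach m (j+1) = false := ih (j+1) (by omega) (by omega) (by omega)
        have hj0 : pvReach m j = false := ih j (by omega) (by omega) (by omega)
        unfold pvReach
        rw [pvDp_both_unreached m j hj1 hj0]

theorem pvLarr_final (m : List Int) (t : ℕ) (ht : t ≤ m.length)
    (hw : ∀ i, ¬ pvWant m t i) : pvLarr m t = pvDparr m := by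
  by_cases hn : m.length = 0
  · unfold pvLarr pvDparr; rw [hn]; rfl
  · have h1 : 1 ≤ t := by
      by_contra h0
      have ht0 : t = 0 := by omega
      exact hw 0 ⟨by omega, by omega, Or.inl ⟨by omega, by rw [ht0] at *; exact pvReach_zero m⟩⟩
    have htail := pvTail_unreached m t h1 hw
    unfold pvLarr pvDparr
    refine pvMapRange_congr _ _ _ (fun i hi => ?_)
    unfold pvLfun
    by_cases hle : i ≤ t+1
    · simp [hle]
    · by_cases hit2 : i = t+2
      · subst hit2
        have hrt : pvReach m t = false := htail t (le_refl t) (by omega)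
        have hpv : ¬ (0 < pvPval m t) := fun hp => (hw (t+2)) ⟨hi, by omega, Or.inr ⟨rfl, hp⟩⟩
        have hnn := pvPval_nonneg m t
        rw [pvDp_eq_pval m t hrt]
        simp [hle]
      · have hri : pvReach m i = false := htail i (by omega) hi
        have := pvDp_unreached m i (by omega) hri
        simp [hle, hit2, this]

theorem pvPval_zero (m : List Int) (t : ℕ) (h : pvReach m t = false) : pvPval m (t+1) = 0 := by
  unfold pvPval
  rw [pvPopt_succ, pvOpt_none m t h]
  rfl

theorem pvReach_of_pval_pos (m : List Int) (t : ℕ) (h : 0 < pvPval m t) :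
    pvReach m (t+2) = true :=
  (pvReach_iff_pos m t).mpr (lt_of_lt_of_le h (pvDp_ge_pval m t))

theorem pvGetD_set_ne (l : List Int) (i j : ℕ) (v : Int) (h : i ≠ j) :
    (l.set i v).getD j 0 = l.getD j 0 := by
  simp [List.getD_eq_getElem?_getD, List.getElem?_set, h]

-- the new array contents after processing a fresh index a (threshold t → a+1)
theorem pvLnew (m : List Int) (t a : ℕ) (hat : t ≤ a) (ha2 : a ≤ t+2) (han : a < m.length)
    (hre : pvReach m a = true) (hU : ∀ i, t ≤ i → i < a → pvReach m i = false)
    (i : ℕ) (hin : i < m.length) :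
    pvLfun m (a+1) i =
      if i = a+2 ∧ pvPval m a < pvDp m a + m.getD (a+2) 0 then pvDp m a + m.getD (a+2) 0
      else if i = a+3 ∧ 0 < pvDp m a + m.getD (a+3) 0 then pvDp m a + m.getD (a+3) 0
      else pvLfun m t i := by
  by_cases h2 : i = a+2
  · subst h2
    by_cases hcc : pvPval m a < pvDp m a + m.getD (a+2) 0
    · rw [if_pos ⟨rfl, hcc⟩]
      unfold pvLfun
      rw [if_pos (by omega)]
      rw [pvUpd2 m a hre, if_pos hcc]
    · rw [if_neg (by tauto), if_neg (by omega)]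
      unfold pvLfun
      rw [if_pos (by omega)]
      rw [pvUpd2 m a hre, if_neg hcc]
      rcases Nat.lt_or_ge a (t+1) with hc | hc
      · have : a = t := by omega
        subst this
        rw [if_neg (by omega), if_pos rfl]
      · obtain ⟨b, rfl⟩ : ∃ b, a = b + 1 := ⟨a - 1, by omega⟩
        rw [pvPval_zero m b (hU b (by omega) (by omega))]
        rw [if_neg (by omega), if_neg (by omega)]
  · by_cases h3 : i = a+3
    · subst h3
      rw [if_neg (by omega)]
      have hps := pvPval_succ_eq m a hre
      by_cases hcc : 0 < pvDp m a + m.getD (a+3) 0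
      · rw [if_pos ⟨rfl, hcc⟩]
        unfold pvLfun
        rw [if_neg (by omega), if_pos (by omega)]
        have : a + 1 + 2 = a + 3 := by omega
        rw [← this] at hps ⊢
        rw [hps, if_pos (by rwa [this])]
      · rw [if_neg (by tauto)]
        unfold pvLfun
        rw [if_neg (by omega), if_pos (by omega), if_neg (by omega), if_neg (by omega)]
        have : a + 1 + 2 = a + 3 := by omega
        rw [← this] at hps
        rw [hps, if_neg (by rwa [this])]
    · rw [if_neg (by tauto), if_neg (by tauto)]
      unfold pvLfun
      by_cases hle : i ≤ t+1
      · rw [if_pos hle, if_pos (by omega)]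
      · by_cases hit2 : i = t+2
        · subst hit2
          have hta : t < a := by omega
          rw [if_neg hle, if_pos rfl, if_pos (by omega)]
          exact pvDp_eq_pval m t (hU t (le_refl t) hta)
        · rw [if_neg hle, if_neg hit2]
          by_cases hla2 : i ≤ a+2
          · have hi3 : i = t+3 ∧ a = t+2 := by omega
            obtain ⟨rfl, rfl⟩ := hi3
            rw [if_pos (by omega)]
            have := pvDp_both_unreached m t (hU (t+1) (by omega) (by omega)) (hU t (by omega) (by omega))
            unfold pvDp
            rw [this]
          · rw [if_neg (by omega), if_neg (by omega)]

-- assembling the invariant at threshold a+1 after processing a fresh index a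
theorem pvInvStep (m : List Int) (t a : ℕ) (rest : List ℕ)
    (hat : t ≤ a) (han : a < m.length) (hre : pvReach m a = true)
    (hsortq : (a :: rest).Pairwise (· ≤ ·))
    (hbnd : ∀ e ∈ a :: rest, t ≤ e + 1 ∧ e < m.length ∧ pvReach m e = true)
    (hqw : ∀ e ∈ a :: rest, t ≤ e → pvWant m t e)
    (hmw : ∀ i, pvWant m t i → i ∈ a :: rest)
    (q' : List ℕ)
    (hq'sort : q'.Pairwise (· ≤ ·))
    (hmem : ∀ e, e ∈ q' ↔ e ∈ rest ∨
        (e = a+2 ∧ (a+2 < m.length ∧ pvPval m a < pvDp m a + m.getD (a+2) 0)) ∨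
        (e = a+3 ∧ (a+3 < m.length ∧ 0 < pvDp m a + m.getD (a+3) 0))) :
    pvInv m (a+1) (pvLarr m (a+1)) q' := by
  have hrest_ge : ∀ e ∈ rest, a ≤ e := fun e he => List.rel_of_pairwise_cons hsortq he
  have ha2 : a ≤ t+2 := by
    rcases (hqw a (List.mem_cons_self) hat).2.2 with ⟨h, _⟩ | ⟨h, _⟩ <;> omega
  have hU : ∀ i, t ≤ i → i < a → pvReach m i = false := by
    intro i h1 h2
    cases hr : pvReach m i with
    | false => rfl
    | true =>
      exfalso
      have hwi : pvWant m t i := ⟨by omega, h1, Or.inl ⟨by omega, hr⟩⟩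
      rcases List.mem_cons.mp (hmw i hwi) with rfl | hm
      · omega
      · exact absurd (hrest_ge i hm) (by omega)
  have hr2pos : (a+2 < m.length ∧ pvPval m a < pvDp m a + m.getD (a+2) 0) →
      pvReach m (a+2) = true := by
    rintro ⟨h1, h2⟩
    refine (pvReach_iff_pos m a).mpr ?_
    rw [pvUpd2 m a hre, if_pos h2]
    have := pvPval_nonneg m a
    omega
  have hr3pos : 0 < pvDp m a + m.getD (a+3) 0 → pvReach m (a+3) = true := by
    intro h
    have h3 : a + 1 + 2 = a + 3 := by omega
    rw [← h3]
    refine pvReach_of_pval_pos m (a+1) ?_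
    rw [pvPval_succ_eq m a hre]
    rw [h3, if_pos h]
    omega
  have hpv3 : 0 < pvDp m a + m.getD (a+3) 0 → 0 < pvPval m (a+1) := by
    intro h
    have h3 : a + 1 + 2 = a + 3 := by omega
    rw [pvPval_succ_eq m a hre, h3, if_pos h]
    omega
  refine ⟨by omega, rfl, hq'sort, ?_, ?_, ?_⟩
  · -- bounds and eligibility
    intro e he
    rcases (hmem e).mp he with hm | ⟨rfl, hC⟩ | ⟨rfl, hC⟩
    · have hb := hbnd e (List.mem_cons_of_mem a hm)
      have hge := hrest_ge e hm
      exact ⟨by omega, hb.2.1, hb.2.2⟩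
    · exact ⟨by omega, hC.1, hr2pos hC⟩
    · exact ⟨by omega, hC.1, hr3pos hC.2⟩
  · -- every queued index ≥ a+1 is wanted at threshold a+1
    intro e he hae
    rcases (hmem e).mp he with hm | ⟨rfl, hC⟩ | ⟨rfl, hC⟩
    · have hw := hqw e (List.mem_cons_of_mem a hm) (by omega)
      rcases hw.2.2 with ⟨hle, hr⟩ | ⟨he2, hpv⟩
      · exact ⟨hw.1, by omega, Or.inl ⟨by omega, hr⟩⟩
      · subst he2
        exact ⟨hw.1, by omega, Or.inl ⟨by omega, pvReach_of_pval_pos m t hpv⟩⟩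
    · exact ⟨hC.1, by omega, Or.inl ⟨by omega, hr2pos hC⟩⟩
    · exact ⟨hC.1, by omega, Or.inr ⟨by omega, hpv3 hC.2⟩⟩
  · -- every index wanted at threshold a+1 is queued
    intro i hwi
    obtain ⟨hin, hai, hcase⟩ := hwi
    rw [hmem i]
    rcases hcase with ⟨hle, hri⟩ | ⟨hi3, hpv⟩
    · -- i = a+1 or i = a+2, reached
      by_cases hia1 : i = a+1
      · subst hia1
        left
        rcases Nat.lt_or_ge a (t+1) with hc | hc
        · -- a = t
          have hat' : a = t := by omega
          have hw : pvWant m t (a+1) := ⟨hin, by omega, Or.inl ⟨by omega, hri⟩⟩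
          rcases List.mem_cons.mp (hmw _ hw) with h | h
          · omega
          · exact h
        · rcases Nat.lt_or_ge a (t+2) with hc2 | hc2
          · -- a = t+1 : i = t+2, reached means pval t positive
            have hat' : a = t+1 := by omega
            have hrt : pvReach m t = false := hU t (le_refl t) (by omega)
            have hpos : 0 < pvPval m t := by
              have h1 := (pvReach_iff_pos m t).mp (by rw [show t+2 = a+1 by omega]; exact hri)
              rwa [pvDp_eq_pval m t hrt] at h1
            have hw : pvWant m t (a+1) := ⟨hin, by omega, Or.inr ⟨by omega, hpos⟩⟩
            rcases List.mem_cons.mp (hmw _ hw) with h | h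
            · omega
            · exact h
          · -- a = t+2 : i = t+3 cannot be reached
            have hat' : a = t+2 := by omega
            exfalso
            have := pvDp_both_unreached m t (hU (t+1) (by omega) (by omega)) (hU t (by omega) (by omega))
            have hri' : pvReach m (t+3) = true := by rw [show t+3 = a+1 by omega]; exact hri
            unfold pvReach at hri'
            rw [this] at hri'
            exact Bool.noConfusion hri'
      · -- i = a+2
        have hia2 : i = a+2 := by omega
        subst hia2
        by_cases hcc : pvPval m a < pvDp m a + m.getD (a+2) 0
        · exact Or.inr (Or.inl ⟨rfl, hin, hcc⟩)
        · -- no update fired, yet a+2 is reached: its value is the old partial one, so a = t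
          left
          have hdp : pvDp m (a+2) = pvPval m a := by rw [pvUpd2 m a hre, if_neg hcc]
          have hpos : 0 < pvPval m a := by
            have := (pvReach_iff_pos m a).mp hri
            omega
          rcases Nat.lt_or_ge a (t+1) with hc | hc
          · have hat' : a = t := by omega
            subst hat'
            have hw : pvWant m a (a+2) := ⟨hin, by omega, Or.inr ⟨rfl, hpos⟩⟩
            rcases List.mem_cons.mp (hmw _ hw) with h | h
            · omega
            · exact h
          · exfalso
            obtain ⟨b, rfl⟩ : ∃ b, a = b + 1 := ⟨a - 1, by omega⟩
            rw [pvPval_zero m b (hU b (by omega) (by omega))] at hpos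
            omega
    · -- i = a+3 with positive new partial value
      have hia3 : i = a+3 := by omega
      subst hia3
      have hv3 : 0 < pvDp m a + m.getD (a+3) 0 := by
        by_contra hcc
        rw [pvPval_succ_eq m a hre, show a+1+2 = a+3 by omega, if_neg hcc] at hpv
        omega
      exact Or.inr (Or.inr ⟨rfl, hin, hv3⟩)

-- the main loop simulation
theorem pvLoop (m : List Int) : ∀ fuel t l q, pvInv m t l q →
    q.length + 2*(m.length - t) ≤ fuel →
    pojedinaLoop m fuel l q = pvMaxOf (pvDparr m) := by
  intro fuel
  induction fuel with
  | zero =>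
    intro t l q hInv hf
    obtain ⟨ht, hl, _, _, _, hmw⟩ := hInv
    have hq : q = [] := by
      cases q with
      | nil => rfl
      | cons a r => simp at hf
    subst hq
    have htn : m.length ≤ t := by omega
    show pvMaxOf l = pvMaxOf (pvDparr m)
    rw [hl]
    congr 1
    unfold pvLarr pvDparr
    refine pvMapRange_congr _ _ _ (fun i hi => ?_)
    unfold pvLfun
    rw [if_pos (by omega)]
  | succ fuel ih =>
    intro t l q hInv hf
    obtain ⟨ht, hl, hsort, hbnd, hqw, hmw⟩ := hInv
    cases q with
    | nil =>
      have hw : ∀ i, ¬ pvWant m t i := fun i hwi => by simpa using hmw i hwi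
      show pvMaxOf l = pvMaxOf (pvDparr m)
      rw [hl, pvLarr_final m t ht hw]
    | cons a rest =>
      have hsel : a ∈ a :: rest := List.mem_cons_self
      obtain ⟨hta1, han, hre⟩ := hbnd a hsel
      have hrest_ge : ∀ e ∈ rest, a ≤ e := fun e he => List.rel_of_pairwise_cons hsort he
      have hsort' : rest.Pairwise (· ≤ ·) := (List.pairwise_cons.mp hsort).2
      have hlget : ∀ i, l.getD i 0 = if i < m.length then pvLfun m t i else 0 := by
        intro i
        rw [hl, pvLarr_getD]
      have hflen : (a :: rest).length + 2*(m.length - t) ≤ fuel + 1 := hf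
      rcases Nat.lt_or_ge a t with hat | hat
      · -- STALE: a = t-1 was already fully processed; both relaxations are no-ops
        have hta : t = a+1 := by omega
        subst hta
        have hg_a : l.getD a 0 = pvDp m a := by
          rw [hlget a, if_pos han]
          unfold pvLfun
          rw [if_pos (by omega)]
        have hc2 : ¬ (a+2 < m.length ∧ l.getD (a+2) 0 < l.getD a 0 + m.getD (a+2) 0) := by
          rintro ⟨h2n, hlt⟩
          have hg2 : l.getD (a+2) 0 = pvDp m (a+2) := by
            rw [hlget (a+2), if_pos h2n]
            unfold pvLfun
            rw [if_pos (by omega)]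
          rw [hg2, hg_a] at hlt
          have := pvDp_ge2 m a hre
          omega
        have hc3 : ¬ (a+3 < m.length ∧ l.getD (a+3) 0 < l.getD a 0 + m.getD (a+3) 0) := by
          rintro ⟨h3n, hlt⟩
          have hg3 : l.getD (a+3) 0 = pvPval m (a+1) := by
            rw [hlget (a+3), if_pos h3n]
            unfold pvLfun
            rw [if_neg (by omega), if_pos (by omega)]
          rw [hg3, hg_a] at hlt
          have := pvPval_ge m a hre
          omega
        rw [pojedinaLoop]
        simp only [if_neg hc2, if_neg hc3]
        refine ih (a+1) l rest ⟨ht, hl, hsort', ?_, ?_, ?_⟩ ?_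
        · exact fun e he => hbnd e (List.mem_cons_of_mem a he)
        · exact fun e he hte => hqw e (List.mem_cons_of_mem a he) hte
        · intro i hwi
          rcases List.mem_cons.mp (hmw i hwi) with rfl | h
          · exact absurd hwi.2.1 (by omega)
          · exact h
        · simp at hflen ⊢
          omega
      · -- FRESH: a ∈ {t, t+1, t+2} is processed now; threshold advances to a+1
        have hwa := hqw a hsel hat
        have ha2 : a ≤ t+2 := by
          rcases hwa.2.2 with ⟨h, _⟩ | ⟨h, _⟩ <;> omega
        have hU : ∀ i, t ≤ i → i < a → pvReach m i = false := by
          intro i h1 h2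
          cases hr : pvReach m i with
          | false => rfl
          | true =>
            exfalso
            have hwi : pvWant m t i := ⟨by omega, h1, Or.inl ⟨by omega, hr⟩⟩
            rcases List.mem_cons.mp (hmw i hwi) with rfl | hm
            · omega
            · exact absurd (hrest_ge i hm) (by omega)
        have hla : l.getD a 0 = pvDp m a := by
          rw [hlget a, if_pos han]
          unfold pvLfun
          rcases Nat.lt_or_ge a (t+2) with h | h
          · rw [if_pos (by omega)]
          · have he : a = t+2 := by omega
            rw [if_neg (by omega), if_pos (by omega), he,
                pvDp_eq_pval m t (hU t (le_refl t) (by omega))]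
        have hold2 : a+2 < m.length → l.getD (a+2) 0 = pvPval m a := by
          intro h2n
          rw [hlget, if_pos h2n]
          unfold pvLfun
          rcases Nat.lt_or_ge a (t+1) with h | h
          · have haa : a = t := by omega
            subst haa
            rw [if_neg (by omega), if_pos (by omega)]
          · obtain ⟨b, rfl⟩ : ∃ b, a = b+1 := ⟨a-1, by omega⟩
            rw [if_neg (by omega), if_neg (by omega),
                pvPval_zero m b (hU b (by omega) (by omega))]
        have hold3 : a+3 < m.length → l.getD (a+3) 0 = 0 := by
          intro h3n
          rw [hlget, if_pos h3n]
          unfold pvLfun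
          rw [if_neg (by omega), if_neg (by omega)]
        have hlenq : rest.length + 1 + 2*(m.length - t) ≤ fuel + 1 := by
          simpa using hflen
        rw [pojedinaLoop]
        by_cases hc2 : (a+2 < m.length ∧ l.getD (a+2) 0 < l.getD a 0 + m.getD (a+2) 0)
        · simp only [if_pos hc2]
          have harith2 : pvPval m a < pvDp m a + m.getD (a+2) 0 := by
            have h := hc2.2
            rwa [hold2 hc2.1, hla] at h
          have hsetX : (l.set (a+2) (l.getD a 0 + m.getD (a+2) 0)).getD a 0 = pvDp m a := by
            rw [pvGetD_set_ne l (a+2) a _ (by omega), hla]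
          have hset3 : a+3 < m.length →
              (l.set (a+2) (l.getD a 0 + m.getD (a+2) 0)).getD (a+3) 0 = 0 := by
            intro h
            rw [pvGetD_set_ne l (a+2) (a+3) _ (by omega), hold3 h]
          by_cases hc3 : (a+3 < m.length ∧
              (l.set (a+2) (l.getD a 0 + m.getD (a+2) 0)).getD (a+3) 0 <
              (l.set (a+2) (l.getD a 0 + m.getD (a+2) 0)).getD a 0 + m.getD (a+3) 0)
          · simp only [if_pos hc3]
            have harith3 : 0 < pvDp m a + m.getD (a+3) 0 := by
              have h := hc3.2
              rwa [hset3 hc3.1, hsetX] at h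
            have hlnew : (l.set (a+2) (l.getD a 0 + m.getD (a+2) 0)).set (a+3)
                ((l.set (a+2) (l.getD a 0 + m.getD (a+2) 0)).getD a 0 + m.getD (a+3) 0)
                = pvLarr m (a+1) := by
              rw [hsetX, hla, hl]
              unfold pvLarr
              rw [pvSet_map_range, pvSet_map_range]
              refine pvMapRange_congr _ _ _ (fun i hi => ?_)
              rw [pvLnew m t a hat ha2 han hre hU i hi]
              by_cases h3 : i = a+3
              · subst h3
                rw [if_pos rfl, if_neg (by omega), if_pos ⟨rfl, harith3⟩]
              · by_cases h2i : i = a+2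
                · subst h2i
                  rw [if_neg (by omega), if_pos rfl, if_pos ⟨rfl, harith2⟩]
                · rw [if_neg h3, if_neg h2i, if_neg (by tauto), if_neg (by tauto)]
            rw [hlnew]
            refine ih (a+1) _ _ (pvInvStep m t a rest hat han hre hsort hbnd hqw hmw _
              (List.Pairwise.orderedInsert _ _ (List.Pairwise.orderedInsert _ _ hsort')) ?_) ?_
            · intro e
              simp only [List.mem_orderedInsert]
              constructor
              · rintro (rfl | rfl | h)
                · exact Or.inr (Or.inr ⟨rfl, hc3.1, harith3⟩)
                · exact Or.inr (Or.inl ⟨rfl, hc2.1, harith2⟩)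
                · exact Or.inl h
              · rintro (h | ⟨rfl, _⟩ | ⟨rfl, _⟩)
                · exact Or.inr (Or.inr h)
                · exact Or.inr (Or.inl rfl)
                · exact Or.inl rfl
            · rw [List.orderedInsert_length, List.orderedInsert_length]
              omega
          · simp only [if_neg hc3]
            have harith3n : a+3 < m.length → ¬ (0 < pvDp m a + m.getD (a+3) 0) := by
              intro h hpos
              exact hc3 ⟨h, by rw [hset3 h, hsetX]; exact hpos⟩
            have hlnew : l.set (a+2) (l.getD a 0 + m.getD (a+2) 0) = pvLarr m (a+1) := by
              rw [hla, hl]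
              unfold pvLarr
              rw [pvSet_map_range]
              refine pvMapRange_congr _ _ _ (fun i hi => ?_)
              rw [pvLnew m t a hat ha2 han hre hU i hi]
              by_cases h2i : i = a+2
              · subst h2i
                rw [if_pos rfl, if_pos ⟨rfl, harith2⟩]
              · by_cases h3 : i = a+3
                · subst h3
                  rw [if_neg (by omega), if_neg (by omega),
                      if_neg (fun hx => harith3n hi hx.2)]
                · rw [if_neg h2i, if_neg (by tauto), if_neg (by tauto)]
            rw [hlnew]
            refine ih (a+1) _ _ (pvInvStep m t a rest hat han hre hsort hbnd hqw hmw _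
              (List.Pairwise.orderedInsert _ _ hsort') ?_) ?_
            · intro e
              simp only [List.mem_orderedInsert]
              constructor
              · rintro (rfl | h)
                · exact Or.inr (Or.inl ⟨rfl, hc2.1, harith2⟩)
                · exact Or.inl h
              · rintro (h | ⟨rfl, _⟩ | ⟨rfl, hb, hpos⟩)
                · exact Or.inr h
                · exact Or.inl rfl
                · exact absurd hpos (harith3n hb)
            · rw [List.orderedInsert_length]
              omega
        · simp only [if_neg hc2]
          have harith2n : a+2 < m.length → ¬ (pvPval m a < pvDp m a + m.getD (a+2) 0) := by
            intro h hlt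
            exact hc2 ⟨h, by rw [hold2 h, hla]; exact hlt⟩
          by_cases hc3 : (a+3 < m.length ∧ l.getD (a+3) 0 < l.getD a 0 + m.getD (a+3) 0)
          · simp only [if_pos hc3]
            have harith3 : 0 < pvDp m a + m.getD (a+3) 0 := by
              have h := hc3.2
              rwa [hold3 hc3.1, hla] at h
            have hlnew : l.set (a+3) (l.getD a 0 + m.getD (a+3) 0) = pvLarr m (a+1) := by
              rw [hla, hl]
              unfold pvLarr
              rw [pvSet_map_range]
              refine pvMapRange_congr _ _ _ (fun i hi => ?_)
              rw [pvLnew m t a hat ha2 han hre hU i hi]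
              by_cases h3 : i = a+3
              · subst h3
                rw [if_pos rfl, if_neg (by omega), if_pos ⟨rfl, harith3⟩]
              · by_cases h2i : i = a+2
                · subst h2i
                  rw [if_neg (by omega), if_neg (fun hx => harith2n hi hx.2),
                      if_neg (by omega)]
                · rw [if_neg h3, if_neg (by tauto), if_neg (by tauto)]
            rw [hlnew]
            refine ih (a+1) _ _ (pvInvStep m t a rest hat han hre hsort hbnd hqw hmw _
              (List.Pairwise.orderedInsert _ _ hsort') ?_) ?_
            · intro e
              simp only [List.mem_orderedInsert]
              constructor
              · rintro (rfl | h)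
                · exact Or.inr (Or.inr ⟨rfl, hc3.1, harith3⟩)
                · exact Or.inl h
              · rintro (h | ⟨rfl, hb, hpos⟩ | ⟨rfl, _⟩)
                · exact Or.inr h
                · exact absurd hpos (harith2n hb)
                · exact Or.inl rfl
            · rw [List.orderedInsert_length]
              omega
          · simp only [if_neg hc3]
            have harith3n : a+3 < m.length → ¬ (0 < pvDp m a + m.getD (a+3) 0) := by
              intro h hpos
              exact hc3 ⟨h, by rw [hold3 h, hla]; exact hpos⟩
            have hlnew : l = pvLarr m (a+1) := by
              rw [hl]
              unfold pvLarr
              refine pvMapRange_congr _ _ _ (fun i hi => ?_)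
              rw [pvLnew m t a hat ha2 han hre hU i hi]
              by_cases h2i : i = a+2
              · subst h2i
                rw [if_neg (fun hx => harith2n hi hx.2), if_neg (by omega)]
              · by_cases h3 : i = a+3
                · subst h3
                  rw [if_neg (by omega), if_neg (fun hx => harith3n hi hx.2)]
                · rw [if_neg (by tauto), if_neg (by tauto)]
            rw [hlnew]
            refine ih (a+1) _ _ (pvInvStep m t a rest hat han hre hsort hbnd hqw hmw _
              hsort' ?_) ?_
            · intro e
              constructor
              · exact fun h => Or.inl h
              · rintro (h | ⟨rfl, hb, hpos⟩ | ⟨rfl, hb, hpos⟩)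
                · exact h
                · exact absurd hpos (harith2n hb)
                · exact absurd hpos (harith3n hb)
            · omega

-- ===== VERDICT (by name: the statement is the Claim_ definition above) =====
theorem pojedina_spec : Claim_equal_pojedina := by
  intro m _ hpre
  unfold Spec_pojedina
  rw [pojedina_alt_eq m hpre]
  have hn : 1 ≤ m.length := by
    cases m with
    | nil => exact absurd rfl hpre
    | cons a t => simp
  have hinit : (List.replicate m.length (0:Int)).set 0 (m.getD 0 0) = pvLarr m 0 := by
    apply List.ext_getElem
    · simp [pvLarr]
    · intro k h1 h2
      rw [List.getElem_set]
      unfold pvLarr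
      simp only [List.getElem_map, List.getElem_range, List.getElem_replicate]
      match k with
      | 0 => norm_num; rfl
      | 1 => norm_num; rfl
      | 2 => norm_num; rfl
      | (j+3) =>
        norm_num
        unfold pvLfun
        rw [if_neg (by omega), if_neg (by omega)]
  unfold pojedina
  rw [hinit]
  refine pvLoop m (2*m.length+2) 0 _ [0] ⟨by omega, rfl, by simp, ?_, ?_, ?_⟩ (by simp; omega)
  · intro e he
    simp at he
    subst he
    exact ⟨by omega, by omega, pvReach_zero m⟩
  · intro e he _
    simp at he
    subst he
    exact ⟨by omega, by omega, Or.inl ⟨by omega, pvReach_zero m⟩⟩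
  · intro i hwi
    obtain ⟨hin, _, hcase⟩ := hwi
    rcases hcase with ⟨hle, hri⟩ | ⟨hi2, hpv⟩
    · match i, hle with
      | 0, _ => simp
      | 1, _ => exact absurd hri (by rw [pvReach_one]; simp)
    · exfalso
      have : pvPval m 0 = 0 := rfl
      omega
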